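-- pv_equiv track=rewrite | github.com/TestOwl-QA/TestOwl | src/skills/db_checker/rules/__init__.py | detect_game_type
-- ===== SOURCE A (Python) =====
-- from typing import List, Type, Optional
--
-- def detect_game_type(table_names: List[str]) -> Optional[str]:
--     """
--     根据表名推测游戏类型
--
--     Args:
--         table_names: 数据库中的表名列表
--
--     Returns:
--         推测的游戏类型，无法确定时返回 None
--     """
--     table_names_lower = [t.lower() for t in table_names]
--
--     # RPG 特征表
--     rpg_indicators = ["player", "character", "equipment", "quest", "task", "guild", "inventory", "skill"]
--     rpg_score = sum(1 for t in rpg_indicators if any(t in name for name in table_names_lower))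
--
--     # 卡牌特征表
--     card_indicators = ["card", "gacha", "deck", "draw", "pack"]
--     card_score = sum(1 for t in card_indicators if any(t in name for name in table_names_lower))
--
--     # 休闲特征表
--     casual_indicators = ["level", "stage", "ad", "advertisement", "achievement", "star"]
--     casual_score = sum(1 for t in casual_indicators if any(t in name for name in table_names_lower))
--
--     # 竞技特征表
--     competitive_indicators = ["match", "battle", "rank", "season", "leaderboard", "arena"]
--     competitive_score = sum(1 for t in competitive_indicators if any(t in name for name in table_names_lower))
--
--     # 模拟经营特征表
--     simulation_indicators = ["building", "production", "order", "trade", "farm", "factory"]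
--     simulation_score = sum(1 for t in simulation_indicators if any(t in name for name in table_names_lower))
--
--     scores = {
--         "rpg": rpg_score,
--         "card": card_score,
--         "casual": casual_score,
--         "competitive": competitive_score,
--         "simulation": simulation_score,
--     }
--
--     best_match = max(scores, key=scores.get)
--
--     # 只有当分数超过阈值才返回
--     if scores[best_match] >= 2:
--         return best_match
--
--     return None
-- ===== SOURCE B (Python) =====
-- # Inverted index: each indicator maps to its owning category; one flat matched-set
-- # comprehension, a grouping pass over it, and a threshold-seeded running selection.
-- _OWNER = {
--     ind: cat
--     for cat, inds in [
--         ("rpg", ["player", "character", "equipment", "quest", "task", "guild", "inventory", "skill"]),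
--         ("card", ["card", "gacha", "deck", "draw", "pack"]),
--         ("casual", ["level", "stage", "ad", "advertisement", "achievement", "star"]),
--         ("competitive", ["match", "battle", "rank", "season", "leaderboard", "arena"]),
--         ("simulation", ["building", "production", "order", "trade", "farm", "factory"]),
--     ]
--     for ind in inds
-- }
--
-- def detect_game_type(table_names):
--     lowered = [t.lower() for t in table_names]
--     matched = {ind for name in lowered for ind in _OWNER if ind in name}
--     scores = {}
--     for ind in matched:
--         cat = _OWNER[ind]
--         scores[cat] = scores.get(cat, 0) + 1
--     # seed the accumulator with the threshold-1 score: a category can only win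
--     # by strictly exceeding 1, so the >=2 cutoff needs no separate check
--     best, best_score = None, 1
--     for cat in ("rpg", "card", "casual", "competitive", "simulation"):
--         s = scores.get(cat, 0)
--         if s > best_score:
--             best, best_score = cat, s
--     return best
-- ===== Notes on version B (the rewrite author's own statement) =====
-- stated objective: alternative
-- what changed: A runs five separate per-indicator passes (for each indicator of each hard-coded category, an any() scan over the names) and then picks the best via dict + max(key=scores.get) with an explicit >=2 check; B instead builds an inverted indicator->category index once, collects a single flat set of all matched indicators in one comprehension over the names, derives the per-category scores by a grouping pass over that set, and selects the winner with an accumulator seeded at the threshold score 1, so the >=2 cutoff needs no separate check.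
import Mathlib
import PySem

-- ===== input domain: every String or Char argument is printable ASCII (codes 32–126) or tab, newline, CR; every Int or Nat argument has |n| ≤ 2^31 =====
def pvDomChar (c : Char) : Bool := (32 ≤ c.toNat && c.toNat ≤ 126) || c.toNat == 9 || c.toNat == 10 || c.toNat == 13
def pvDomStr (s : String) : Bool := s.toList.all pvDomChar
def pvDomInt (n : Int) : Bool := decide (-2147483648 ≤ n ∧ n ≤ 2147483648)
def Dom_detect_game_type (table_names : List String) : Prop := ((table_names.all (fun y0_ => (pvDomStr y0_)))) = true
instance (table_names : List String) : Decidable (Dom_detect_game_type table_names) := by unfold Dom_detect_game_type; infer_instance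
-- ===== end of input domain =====

-- B replaces A's five per-category indicator scans + dict/max selection by an inverted
-- indicator->category index, one flat matched-indicator set, a grouping pass over it,
-- and a threshold-seeded running selection (objective: alternative decomposition).


-- ===== PORT A =====
-- sum(1 for t in indicators if any(t in name for name in names_lower))
def pvASum (names_lower indicators : List String) : Int :=
  indicators.foldl
    (fun acc t => if names_lower.any (fun name => PySem.Str.isIn t name) then acc + 1 else acc) 0

def detect_game_type (table_names : List String) : Option String :=
  let table_names_lower := table_names.map PySem.Str.lower
  let rpg_score := pvASum table_names_lower ["player", "character", "equipment", "quest", "task", "guild", "inventory", "skill"]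
  let card_score := pvASum table_names_lower ["card", "gacha", "deck", "draw", "pack"]
  let casual_score := pvASum table_names_lower ["level", "stage", "ad", "advertisement", "achievement", "star"]
  let competitive_score := pvASum table_names_lower ["match", "battle", "rank", "season", "leaderboard", "arena"]
  let simulation_score := pvASum table_names_lower ["building", "production", "order", "trade", "farm", "factory"]
  let scores : PySem.Dict String Int :=
    (((((PySem.Dict.empty).insert "rpg" rpg_score).insert "card" card_score).insert
        "casual" casual_score).insert "competitive" competitive_score).insert "simulation" simulation_score
  -- max(scores, key=scores.get): every key of scores is present, so scores.get k = scores.getD k 0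
  match PySem.List.max? scores.keys (fun k => scores.getD k 0) with
  | none => none
  | some best_match => if scores.getD best_match 0 ≥ 2 then some best_match else none

-- ===== PORT B =====
-- _OWNER: inverted index, indicator -> owning category (insertion order = flattened category order)
def pvOwner : PySem.Dict String String :=
  PySem.Dict.ofList
    [("player", "rpg"), ("character", "rpg"), ("equipment", "rpg"), ("quest", "rpg"),
     ("task", "rpg"), ("guild", "rpg"), ("inventory", "rpg"), ("skill", "rpg"),
     ("card", "card"), ("gacha", "card"), ("deck", "card"), ("draw", "card"), ("pack", "card"),
     ("level", "casual"), ("stage", "casual"), ("ad", "casual"), ("advertisement", "casual"),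
     ("achievement", "casual"), ("star", "casual"),
     ("match", "competitive"), ("battle", "competitive"), ("rank", "competitive"),
     ("season", "competitive"), ("leaderboard", "competitive"), ("arena", "competitive"),
     ("building", "simulation"), ("production", "simulation"), ("order", "simulation"),
     ("trade", "simulation"), ("farm", "simulation"), ("factory", "simulation")]

-- matched = {ind for name in lowered for ind in _OWNER if ind in name}
def pvMatched (lowered : List String) : PySem.Set String :=
  lowered.foldl
    (fun s name =>
      pvOwner.keys.foldl (fun s ind => if PySem.Str.isIn ind name then PySem.Set.add s ind else s) s)
    PySem.Set.empty

-- scores[cat] = scores.get(cat, 0) + 1 for each matched indicator's owner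
-- (_OWNER[ind] ported as getD with "" default: ind is always a key of _OWNER)
def pvScores (lowered : List String) : PySem.Dict String Int :=
  (pvMatched lowered).foldl
    (fun d ind => d.insert (pvOwner.getD ind "") (d.getD (pvOwner.getD ind "") 0 + 1))
    PySem.Dict.empty

def detect_game_type_alt (table_names : List String) : Option String :=
  let lowered := table_names.map PySem.Str.lower
  let scores := pvScores lowered
  let res := ["rpg", "card", "casual", "competitive", "simulation"].foldl
    (fun (b : Option String × Int) cat =>
      let s := scores.getD cat 0
      if s > b.2 then (some cat, s) else b)
    (none, 1)
  res.1

-- ===== PRECONDITION & SPEC =====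
def Spec_detect_game_type (table_names : List String) (out : Option String) : Prop := out = detect_game_type_alt table_names
instance (table_names : List String) (out : Option String) : Decidable (Spec_detect_game_type table_names out) := by unfold Spec_detect_game_type; infer_instance

-- ===== CLAIM (what is proved, stated in full; the proofs are below) =====
def Claim_equal_detect_game_type : Prop := ∀ (table_names : List String), Dom_detect_game_type table_names → Spec_detect_game_type table_names (detect_game_type table_names)

-- ===== LEMMAS AND PROOFS =====

-- the flat indicator list = the keys of the inverted index
def pvFlat : List String := pvOwner.keys

-- membership in B's matched set
lemma pv_mem_fold (inds lowered : List String) (seen : PySem.Set String) (x : String) :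
    x ∈ lowered.foldl
        (fun seen name =>
          inds.foldl (fun s ind => if PySem.Str.isIn ind name then PySem.Set.add s ind else s) seen)
        seen ↔
      x ∈ seen ∨ (x ∈ inds ∧ lowered.any (fun name => PySem.Str.isIn x name)) := by
  induction lowered generalizing seen with
  | nil => simp
  | cons name l ih =>
    simp only [List.foldl_cons, ih, List.any_cons]
    rw [PySem.List.foldl_if_eq_foldl_filter (p := fun ind => PySem.Str.isIn ind name)
      (f := fun s ind => PySem.Set.add s ind)]
    rw [show (List.foldl (fun s ind => PySem.Set.add s ind) seen
        (List.filter (fun ind => PySem.Str.isIn ind name) inds)) =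
        PySem.Set.update seen (List.filter (fun ind => PySem.Str.isIn ind name) inds) from rfl]
    rw [PySem.Set.mem_update]
    simp only [List.mem_filter, Bool.or_eq_true]
    tauto

lemma pv_nodup_fold (inds lowered : List String) (seen : PySem.Set String) (h : seen.Nodup) :
    (lowered.foldl
        (fun seen name =>
          inds.foldl (fun s ind => if PySem.Str.isIn ind name then PySem.Set.add s ind else s) seen)
        seen).Nodup := by
  induction lowered generalizing seen with
  | nil => exact h
  | cons name l ih =>
    simp only [List.foldl_cons]
    apply ih
    rw [PySem.List.foldl_if_eq_foldl_filter (p := fun ind => PySem.Str.isIn ind name)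
      (f := fun s ind => PySem.Set.add s ind)]
    exact PySem.Set.nodup_update _ _ h

-- the matched set is (as a set) the flat indicator list filtered by "appears in some name"
lemma pv_matched_perm (lowered : List String) :
    (pvFlat.filter (fun t => lowered.any (fun name => PySem.Str.isIn t name))).Perm
      (pvMatched lowered) := by
  unfold pvMatched
  rw [List.perm_ext_iff_of_nodup (List.Nodup.filter _ (by decide))
    (pv_nodup_fold _ _ _ (by simp [PySem.Set.empty]))]
  intro a
  rw [pv_mem_fold, List.mem_filter]
  simp [PySem.Set.empty, pvFlat]

lemma pv_foldl_key (l : List String) (d : PySem.Dict String Int) :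
    l.foldl (fun d ind => d.insert (pvOwner.getD ind "") (d.getD (pvOwner.getD ind "") 0 + 1)) d
      = (l.map (fun ind => pvOwner.getD ind "")).foldl
          (fun d c => d.insert c (d.getD c 0 + 1)) d := by
  induction l generalizing d with
  | nil => rfl
  | cons x l ih => simp only [List.foldl_cons, List.map_cons, ih]

-- B's grouped score of a category = A's per-indicator count for that category
lemma pv_scores_getD (lowered : List String) (cat : String) (inds : List String)
    (hfil : pvFlat.filter (fun x => pvOwner.getD x "" == cat) = inds) :
    (pvScores lowered).getD cat 0 = pvASum lowered inds := by
  unfold pvScores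
  rw [pv_foldl_key]
  rw [PySem.Dict.getD_foldl_insert_add_one, PySem.Dict.getD_empty, zero_add]
  unfold pvASum
  rw [PySem.List.foldl_if_add_one, zero_add]
  congr 1
  rw [List.count_eq_countP, List.countP_map]
  simp only [Function.comp_def]
  have hperm := (pv_matched_perm lowered).countP_eq
      (fun x => (fun c => c == cat) ((fun ind => pvOwner.getD ind "") x))
  rw [← hperm, List.countP_filter]
  rw [← hfil, List.countP_filter]
  exact List.countP_congr (fun a _ => by rw [Bool.and_comm])

-- A's running max / B's threshold-seeded strictly-greater accumulator, abstractly
def pvFA (a x : String × Int) : String × Int := if a.2 < x.2 then x else a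
def pvFB (b : Option String × Int) (x : String × Int) : Option String × Int :=
  if x.2 > b.2 then (some x.1, x.2) else b
def pvCanon (a : String × Int) : Option String × Int :=
  if 1 < a.2 then (some a.1, a.2) else (none, 1)

lemma pv_fb_none (x : String × Int) : pvFB (none, 1) x = pvCanon x := by
  unfold pvFB pvCanon
  split_ifs <;> rfl

lemma pv_inv (ps : List (String × Int)) (m : String × Int) :
    ps.foldl pvFB (pvCanon m) = pvCanon (ps.foldl pvFA m) := by
  induction ps generalizing m with
  | nil => rfl
  | cons x ps ih =>
    simp only [List.foldl_cons]
    rw [← ih]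
    congr 1
    unfold pvFA pvFB pvCanon
    split_ifs <;> first | rfl | omega

lemma pv_maxsel (g : String → Int) (k0 : String) (ks : List String) :
    PySem.List.max? (k0 :: ks) g
      = some (ks.foldl (fun a x => if g a < g x then x else a) k0) := by
  show List.foldl _ (some k0) ks = _
  induction ks generalizing k0 with
  | nil => rfl
  | cons x ks ih =>
    simp only [List.foldl_cons]
    by_cases h : g k0 < g x <;> simp only [h, if_pos, ite_false] <;> exact ih _

lemma pv_strfold_pairs (g : String → Int) (ks : List String) (m0 : String) :
    (ks.map (fun k => (k, g k))).foldl pvFA (m0, g m0)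
      = (ks.foldl (fun a x => if g a < g x then x else a) m0,
         g (ks.foldl (fun a x => if g a < g x then x else a) m0)) := by
  rw [List.foldl_map]
  induction ks generalizing m0 with
  | nil => rfl
  | cons x ks ih =>
    simp only [List.foldl_cons, pvFA]
    by_cases h : g m0 < g x <;> simp only [h, ite_true, ite_false] <;> exact ih _

-- ===== VERDICT (by name: the statement is the Claim_ definition above) =====
set_option maxHeartbeats 1000000 in
theorem detect_game_type_spec : Claim_equal_detect_game_type := by
  intro table_names _
  unfold Spec_detect_game_type
  simp only [detect_game_type, detect_game_type_alt]
  set lowered := List.map PySem.Str.lower table_names with hlow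
  set d : PySem.Dict String Int :=
    (((((PySem.Dict.empty).insert "rpg" (pvASum lowered ["player", "character", "equipment", "quest", "task", "guild", "inventory", "skill"])).insert
        "card" (pvASum lowered ["card", "gacha", "deck", "draw", "pack"])).insert
        "casual" (pvASum lowered ["level", "stage", "ad", "advertisement", "achievement", "star"])).insert
        "competitive" (pvASum lowered ["match", "battle", "rank", "season", "leaderboard", "arena"])).insert
        "simulation" (pvASum lowered ["building", "production", "order", "trade", "farm", "factory"]) with hd
  have hkeys : d.keys = ["rpg", "card", "casual", "competitive", "simulation"] := by
    rw [hd]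
    simp [PySem.Dict.insert, PySem.Dict.contains, PySem.Dict.empty, PySem.Dict.keys]
  have h1 : d.getD "rpg" 0 = pvASum lowered ["player", "character", "equipment", "quest", "task", "guild", "inventory", "skill"] := by
    rw [hd]; simp [PySem.Dict.insert, PySem.Dict.contains, PySem.Dict.empty, PySem.Dict.getD, PySem.Dict.get?]
  have h2 : d.getD "card" 0 = pvASum lowered ["card", "gacha", "deck", "draw", "pack"] := by
    rw [hd]; simp [PySem.Dict.insert, PySem.Dict.contains, PySem.Dict.empty, PySem.Dict.getD, PySem.Dict.get?]
  have h3 : d.getD "casual" 0 = pvASum lowered ["level", "stage", "ad", "advertisement", "achievement", "star"] := by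
    rw [hd]; simp [PySem.Dict.insert, PySem.Dict.contains, PySem.Dict.empty, PySem.Dict.getD, PySem.Dict.get?]
  have h4 : d.getD "competitive" 0 = pvASum lowered ["match", "battle", "rank", "season", "leaderboard", "arena"] := by
    rw [hd]; simp [PySem.Dict.insert, PySem.Dict.contains, PySem.Dict.empty, PySem.Dict.getD, PySem.Dict.get?]
  have h5 : d.getD "simulation" 0 = pvASum lowered ["building", "production", "order", "trade", "farm", "factory"] := by
    rw [hd]; simp [PySem.Dict.insert, PySem.Dict.contains, PySem.Dict.empty, PySem.Dict.getD, PySem.Dict.get?]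
  have hs1 : (pvScores lowered).getD "rpg" 0 = d.getD "rpg" 0 := by
    rw [h1]; exact pv_scores_getD lowered _ _ (by decide)
  have hs2 : (pvScores lowered).getD "card" 0 = d.getD "card" 0 := by
    rw [h2]; exact pv_scores_getD lowered _ _ (by decide)
  have hs3 : (pvScores lowered).getD "casual" 0 = d.getD "casual" 0 := by
    rw [h3]; exact pv_scores_getD lowered _ _ (by decide)
  have hs4 : (pvScores lowered).getD "competitive" 0 = d.getD "competitive" 0 := by
    rw [h4]; exact pv_scores_getD lowered _ _ (by decide)
  have hs5 : (pvScores lowered).getD "simulation" 0 = d.getD "simulation" 0 := by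
    rw [h5]; exact pv_scores_getD lowered _ _ (by decide)
  have hB : (List.foldl
      (fun (b : Option String × Int) cat =>
        if (pvScores lowered).getD cat 0 > b.2 then (some cat, (pvScores lowered).getD cat 0) else b)
      (none, 1) ["rpg", "card", "casual", "competitive", "simulation"]).1
      = (pvCanon ((List.foldl (fun a x => if d.getD a 0 < d.getD x 0 then x else a) "rpg"
        ["card", "casual", "competitive", "simulation"],
          d.getD (List.foldl (fun a x => if d.getD a 0 < d.getD x 0 then x else a) "rpg"
        ["card", "casual", "competitive", "simulation"]) 0))).1 := by
    have e1 : List.foldl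
        (fun (b : Option String × Int) cat =>
          if (pvScores lowered).getD cat 0 > b.2 then (some cat, (pvScores lowered).getD cat 0) else b)
        (none, 1) ["rpg", "card", "casual", "competitive", "simulation"]
        = List.foldl pvFB (none, 1)
            (["rpg", "card", "casual", "competitive", "simulation"].map
              (fun k => (k, (pvScores lowered).getD k 0))) := by
      rw [List.foldl_map]
      rfl
    have e2 : ["rpg", "card", "casual", "competitive", "simulation"].map
        (fun k => (k, (pvScores lowered).getD k 0))
        = ["rpg", "card", "casual", "competitive", "simulation"].map (fun k => (k, d.getD k 0)) := by
      simp only [List.map_cons, List.map_nil, hs1, hs2, hs3, hs4, hs5]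
    rw [e1, e2, List.map_cons, List.foldl_cons, pv_fb_none,
        pv_inv, pv_strfold_pairs (fun k => d.getD k 0) ["card", "casual", "competitive", "simulation"] "rpg"]
  cases hmax : PySem.List.max? d.keys (fun k => d.getD k 0) with
  | none =>
    rw [hkeys, pv_maxsel] at hmax
    simp at hmax
  | some bm =>
    show (if d.getD bm 0 ≥ 2 then some bm else none) = _
    rw [hkeys, pv_maxsel] at hmax
    simp only [Option.some.injEq] at hmax
    rw [hmax] at hB
    rw [hB]
    simp only [pvCanon]
    split_ifs <;> first | rfl | omega
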